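-- pv_equiv track=rewrite | github.com/virgil-serbanuta/bin | indent-z3.py | indentZ3
-- ===== SOURCE A (Python) =====
-- def indentZ3(lines):
--   indent_level = 0
--   indent = ''
--   out = []
--   for line in lines:
--     line = line.strip()
--     if not line:
--       continue
--     out.append(indent + line)
--     if line == '(push 1 )':
--       indent_level += 1
--       indent = indent_level * '  '
--     if line == '(pop 1 )':
--       indent_level -= 1
--       indent = indent_level * '  '
--   return out
-- ===== SOURCE B (Python) =====
-- def indentZ3(lines):
--   cleaned = [s for s in (line.strip() for line in lines) if s]
--   deltas = [1 if s == '(push 1 )' else -1 if s == '(pop 1 )' else 0 for s in cleaned]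
--   levels = []
--   level = 0
--   for d in deltas:
--     levels.append(level)
--     level += d
--   return [l * '  ' + s for l, s in zip(levels, cleaned)]
-- ===== Notes on version B (the rewrite author's own statement) =====
-- stated objective: alternative
-- what changed: Replaces the single stateful loop threading an indent string with a pipeline: strip+filter the lines, map each to a push/pop delta, take an exclusive prefix sum for the levels, and zip levels with lines (negative levels naturally yield no indent via int*str).
import Mathlib
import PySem

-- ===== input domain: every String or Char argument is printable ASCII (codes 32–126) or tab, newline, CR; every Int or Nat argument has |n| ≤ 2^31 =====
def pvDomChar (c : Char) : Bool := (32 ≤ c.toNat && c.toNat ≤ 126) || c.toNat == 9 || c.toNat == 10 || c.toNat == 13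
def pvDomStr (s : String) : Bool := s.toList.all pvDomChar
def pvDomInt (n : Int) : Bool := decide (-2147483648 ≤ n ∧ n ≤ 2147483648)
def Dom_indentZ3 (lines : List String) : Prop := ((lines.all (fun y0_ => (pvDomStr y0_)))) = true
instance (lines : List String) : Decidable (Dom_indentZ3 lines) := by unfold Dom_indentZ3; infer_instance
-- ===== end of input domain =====

-- B changes the decomposition: strip/filter, map to ±1 deltas, exclusive prefix sum, zip — instead of one stateful loop.

-- n * '  '  (Python int * str; negative n gives '')
def pvIndentStr (n : Int) : String := String.ofList (PySem.List.pyRepeat "  ".toList n)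

-- ===== PORT A =====
def indentZ3 (lines : List String) : List String :=
  (lines.foldl (fun (st : Int × String × List String) line =>
      let line := PySem.Str.strip line
      if line = "" then st
      else
        let out := st.2.2 ++ [st.2.1 ++ line]
        let st1 : Int × String :=
          if line = "(push 1 )" then (st.1 + 1, pvIndentStr (st.1 + 1)) else (st.1, st.2.1)
        let st2 : Int × String :=
          if line = "(pop 1 )" then (st1.1 - 1, pvIndentStr (st1.1 - 1)) else st1
        (st2.1, st2.2, out))
    (0, "", [])).2.2

-- ===== PORT B =====
def pvDelta (s : String) : Int :=
  if s = "(push 1 )" then 1 else if s = "(pop 1 )" then -1 else 0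

-- exclusive prefix sum (the loop appending `level` then adding d)
def pvExScan (level : Int) : List Int → List Int
  | [] => []
  | d :: ds => level :: pvExScan (level + d) ds

def indentZ3_alt (lines : List String) : List String :=
  let cleaned := (lines.map PySem.Str.strip).filter (fun s => s ≠ "")
  let deltas := cleaned.map pvDelta
  let levels := pvExScan 0 deltas
  (levels.zip cleaned).map (fun p => pvIndentStr p.1 ++ p.2)

-- ===== PRECONDITION & SPEC =====
def Spec_indentZ3 (lines : List String) (out : List String) : Prop := out = indentZ3_alt lines
instance (lines : List String) (out : List String) : Decidable (Spec_indentZ3 lines out) := by unfold Spec_indentZ3; infer_instance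

-- ===== CLAIM (what is proved, stated in full; the proofs are below) =====
def Claim_equal_indentZ3 : Prop := ∀ (lines : List String), Dom_indentZ3 lines → Spec_indentZ3 lines (indentZ3 lines)

-- ===== LEMMAS AND PROOFS =====

-- canonical recursive form of B's result starting at a given level
def pvRun (lvl : Int) : List String → List String
  | [] => []
  | s :: cs => (pvIndentStr lvl ++ s) :: pvRun (lvl + pvDelta s) cs

theorem pvRun_eq_zip (lvl : Int) (cs : List String) :
    (List.zip (pvExScan lvl (cs.map pvDelta)) cs).map (fun p => pvIndentStr p.1 ++ p.2)
      = pvRun lvl cs := by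
  induction cs generalizing lvl with
  | nil => rfl
  | cons s cs ih => simp [pvExScan, pvRun, ih]

theorem indentZ3_alt_eq_run (lines : List String) :
    indentZ3_alt lines = pvRun 0 ((lines.map PySem.Str.strip).filter (fun s => s ≠ "")) := by
  simp [indentZ3_alt, pvRun_eq_zip]

theorem foldA_eq (lines : List String) (lvl : Int) (out : List String) :
    (lines.foldl (fun (st : Int × String × List String) line =>
      let line := PySem.Str.strip line
      if line = "" then st
      else
        let out := st.2.2 ++ [st.2.1 ++ line]
        let st1 : Int × String :=
          if line = "(push 1 )" then (st.1 + 1, pvIndentStr (st.1 + 1)) else (st.1, st.2.1)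
        let st2 : Int × String :=
          if line = "(pop 1 )" then (st1.1 - 1, pvIndentStr (st1.1 - 1)) else st1
        (st2.1, st2.2, out))
      (lvl, pvIndentStr lvl, out)).2.2
    = out ++ pvRun lvl ((lines.map PySem.Str.strip).filter (fun s => s ≠ "")) := by
  induction lines generalizing lvl out with
  | nil => simp [pvRun]
  | cons l ls ih =>
    simp only [List.foldl_cons, List.map_cons]
    by_cases h0 : PySem.Str.strip l = ""
    · simp [h0, ih]
    · by_cases hp : PySem.Str.strip l = "(push 1 )"
      · have hq : PySem.Str.strip l ≠ "(pop 1 )" := by rw [hp]; decide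
        simp [hp, ih, pvRun, pvDelta]
      · by_cases hq : PySem.Str.strip l = "(pop 1 )"
        · have e : lvl + (-1 : Int) = lvl - 1 := by omega
          simp [hq, pvRun, pvDelta, e]
          simpa using ih (lvl - 1) (out ++ [pvIndentStr lvl ++ "(pop 1 )"])
        · simp [h0, hp, hq, ih, pvRun, pvDelta]

-- ===== VERDICT (by name: the statement is the Claim_ definition above) =====
theorem indentZ3_spec : Claim_equal_indentZ3 := by
  intro lines _
  show indentZ3 lines = indentZ3_alt lines
  have h := foldA_eq lines 0 []
  rw [show pvIndentStr 0 = "" from by decide] at h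
  rw [indentZ3, h, indentZ3_alt_eq_run]
  simp
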